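-- pv_equiv track=rewrite | github.com/AjeeAI/mols-otp | Finalized code for project(Updated).py | flatten_to_digits
-- ===== SOURCE A (Python) =====
-- def flatten_to_digits(auth):
--     flattened = []
--     for item in auth:
--         if isinstance(item, tuple):
--             flattened.extend(flatten_to_digits(item))
--         else:
--             flattened.extend([int(digit) for digit in str(item)])
--     return flattened
-- ===== SOURCE B (Python) =====
-- def flatten_to_digits(auth):
--     # Iterative: explicit worklist instead of recursion; digits extracted
--     # arithmetically by divmod instead of going through str().
--     out = []
--     stack = list(auth)
--     stack.reverse()
--     while stack:
--         item = stack.pop()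
--         if isinstance(item, tuple):
--             stack.extend(reversed(item))
--         else:
--             n = item
--             ds = []
--             while n > 9:
--                 n, d = divmod(n, 10)
--                 ds.append(d)
--             ds.append(n)
--             out.extend(reversed(ds))
--     return out
-- ===== Notes on version B (the rewrite author's own statement) =====
-- stated objective: alternative
-- what changed: Recursion over nested tuples replaced by an explicit worklist stack, and per-item digit extraction done arithmetically with divmod instead of mapping int() over str(item); Pre_ excludes lists containing a negative integer, on which A raises ValueError (int('-')).
import Mathlib
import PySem

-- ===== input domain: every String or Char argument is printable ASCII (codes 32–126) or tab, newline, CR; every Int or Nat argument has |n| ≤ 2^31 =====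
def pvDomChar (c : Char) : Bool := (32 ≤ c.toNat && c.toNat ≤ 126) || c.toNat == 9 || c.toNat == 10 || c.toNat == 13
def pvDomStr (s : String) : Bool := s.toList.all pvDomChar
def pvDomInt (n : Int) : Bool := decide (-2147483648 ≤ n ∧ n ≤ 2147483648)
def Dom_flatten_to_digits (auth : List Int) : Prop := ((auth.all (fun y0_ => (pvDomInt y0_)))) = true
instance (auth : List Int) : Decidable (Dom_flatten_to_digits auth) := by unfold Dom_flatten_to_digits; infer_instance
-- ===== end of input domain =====

-- B replaces A's recursion over nested tuples by an explicit worklist stack and extracts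
-- each item's digits arithmetically with divmod instead of mapping int() over str(item)
-- (objective: alternative, same cost).


-- ===== PORT A =====
-- On List Int the isinstance-tuple branch is unrepresentable, so each item takes the else
-- branch: flattened.extend([int(digit) for digit in str(item)]).  int(digit) raises
-- ValueError on the '-' of a negative item; Pre_ excludes those inputs, so the '.getD 0'
-- default is never reached on the claimed domain.
def flatten_to_digits (auth : List Int) : List Int :=
  auth.foldl
    (fun flattened item =>
      flattened ++ (PySem.Int.toStr item).toList.map
        (fun digit => (PySem.Int.ofChars? [digit]).getD 0))
    []

-- ===== PORT B =====
-- inner while loop: ds = []; while n > 9: n, d = divmod(n, 10); ds.append(d); ds.append(n)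
def bDigitsLoop (n : Int) (ds : List Int) : List Int :=
  if _h : 9 < n then
    bDigitsLoop (PySem.Int.floordiv n 10) (ds ++ [PySem.Int.mod n 10])
  else ds ++ [n]
  termination_by n.toNat
  decreasing_by
    rw [PySem.Int.floordiv_eq_ediv_of_pos (by omega : (0:Int) < 10)]
    omega

-- outer while loop over the worklist: stack = list(auth); stack.reverse(); pop() takes the
-- last element of the reversed list, i.e. the head of auth, so the stack is modelled with
-- its top at the head.  (The tuple branch of Source B is unrepresentable in List Int.)
def flatten_to_digits_alt_go (stack : List Int) (out : List Int) : List Int :=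
  match stack with
  | [] => out
  | item :: rest => flatten_to_digits_alt_go rest (out ++ (bDigitsLoop item []).reverse)

def flatten_to_digits_alt (auth : List Int) : List Int :=
  flatten_to_digits_alt_go auth []

-- ===== PRECONDITION & SPEC =====
-- Pre_ excludes lists containing a negative item: there A raises ValueError, because
-- str(item) starts with '-' and int('-') is not a digit.
def Pre_flatten_to_digits (auth : List Int) : Prop := ∀ x ∈ auth, 0 ≤ x
instance (auth : List Int) : Decidable (Pre_flatten_to_digits auth) := by
  unfold Pre_flatten_to_digits; infer_instance

def pvWitness_flatten_to_digits : List Int := [102, 0, 37, 2147483648]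

def Spec_flatten_to_digits (auth : List Int) (out : List Int) : Prop := out = flatten_to_digits_alt auth
instance (auth : List Int) (out : List Int) : Decidable (Spec_flatten_to_digits auth out) := by unfold Spec_flatten_to_digits; infer_instance

-- ===== CLAIM (what is proved, stated in full; the proofs are below) =====
def Claim_equal_flatten_to_digits : Prop := ∀ (auth : List Int), Dom_flatten_to_digits auth → Pre_flatten_to_digits auth → Spec_flatten_to_digits auth (flatten_to_digits auth)

-- ===== LEMMAS AND PROOFS =====

-- A's per-char parse: int(c) for a digit char
def pcVal (c : Char) : Int := (PySem.Int.ofChars? [c]).getD 0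

theorem pcVal_digitChar (d : Nat) (hd : d < 10) : pcVal (Nat.digitChar d) = (d : Int) := by
  interval_cases d <;> decide

-- reversed digit list (least significant first): closed characterisation of bDigitsLoop
def revd (n : Int) : List Int :=
  if _h : 9 < n then PySem.Int.mod n 10 :: revd (PySem.Int.floordiv n 10) else [n]
  termination_by n.toNat
  decreasing_by
    rw [PySem.Int.floordiv_eq_ediv_of_pos (by omega : (0:Int) < 10)]
    omega

theorem bDigitsLoop_eq (n : Int) (ds : List Int) : bDigitsLoop n ds = ds ++ revd n := by
  fun_induction bDigitsLoop n ds with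
  | case1 n ds h ih =>
      rw [ih]
      conv_rhs => rw [revd]
      rw [dif_pos h]
      simp
  | case2 n ds h =>
      conv_rhs => rw [revd]
      rw [dif_neg h]

-- most-significant-first char list of a Nat, the shape Nat.toDigitsCore produces
def achChars (m : Nat) : List Char :=
  if _h : m < 10 then [Nat.digitChar m]
  else achChars (m / 10) ++ [Nat.digitChar (m % 10)]
  termination_by m
  decreasing_by omega

theorem toDigitsCore_eq_achChars (f : Nat) : ∀ (m : Nat) (ds : List Char), m < 10 ^ (f + 1) →
    Nat.toDigitsCore 10 (f + 1) m ds = achChars m ++ ds := by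
  induction f with
  | zero =>
      intro m ds h
      have h10 : m < 10 := by simpa using h
      have hz : m / 10 = 0 := by omega
      rw [Nat.toDigitsCore, achChars]
      simp [hz, h10, Nat.mod_eq_of_lt h10]
  | succ f ih =>
      intro m ds h
      rw [Nat.toDigitsCore]
      by_cases h10 : m < 10
      · have hz : m / 10 = 0 := by omega
        rw [achChars]
        simp [hz, h10, Nat.mod_eq_of_lt h10]
      · have hne : ¬ m / 10 = 0 := by omega
        rw [achChars]
        simp only [h10, dite_false, if_neg hne]
        rw [ih (m / 10) _ (Nat.div_lt_of_lt_mul (by rw [pow_succ] at h; omega))]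
        simp

theorem toDigits_eq_achChars (m : Nat) : Nat.toDigits 10 m = achChars m := by
  have h : m < 10 ^ (m + 1) := by
    calc m < 2 ^ m := Nat.lt_two_pow_self
    _ ≤ 10 ^ m := Nat.pow_le_pow_left (by norm_num) m
    _ ≤ 10 ^ (m + 1) := Nat.pow_le_pow_right (by norm_num) (Nat.le_succ m)
  have := toDigitsCore_eq_achChars m m [] h
  simpa [Nat.toDigits] using this

theorem revd_natCast (m : Nat) : revd (m : Int) = ((achChars m).map pcVal).reverse := by
  induction m using Nat.strong_induction_on with
  | _ m ih =>
      rw [revd, achChars]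
      by_cases h10 : m < 10
      · have : ¬ (9 : Int) < (m : Int) := by exact_mod_cast (by omega : ¬ 9 < m)
        simp [this, h10, pcVal_digitChar m h10]
      · have h9 : (9 : Int) < (m : Int) := by exact_mod_cast (by omega : 9 < m)
        rw [dif_pos h9, dif_neg h10]
        have hfd : PySem.Int.floordiv (m : Int) 10 = ((m / 10 : Nat) : Int) := by
          exact_mod_cast PySem.Int.floordiv_natCast m 10
        have hmd : PySem.Int.mod (m : Int) 10 = ((m % 10 : Nat) : Int) := by
          exact_mod_cast PySem.Int.mod_natCast m 10
        rw [hfd, hmd, ih (m / 10) (by omega)]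
        simp [pcVal_digitChar (m % 10) (by omega)]

-- A's per-item digit list equals B's per-item digit list, for a nonnegative item
theorem item_digits_eq (x : Int) (hx : 0 ≤ x) :
    (PySem.Int.toStr x).toList.map pcVal = (bDigitsLoop x []).reverse := by
  rw [bDigitsLoop_eq]
  rw [PySem.Int.toList_toStr]
  have hx' : ¬ x < 0 := by omega
  unfold PySem.Int.toChars
  rw [if_neg hx']
  rw [toDigits_eq_achChars]
  conv_rhs => rw [show x = ((x.toNat : Nat) : Int) from (Int.toNat_of_nonneg hx).symm]
  rw [revd_natCast]
  simp

-- the two outer loops agree, given a common accumulator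
theorem go_eq (auth : List Int) : ∀ (acc : List Int), (∀ x ∈ auth, 0 ≤ x) →
    auth.foldl
      (fun flattened item =>
        flattened ++ (PySem.Int.toStr item).toList.map
          (fun digit => (PySem.Int.ofChars? [digit]).getD 0))
      acc = flatten_to_digits_alt_go auth acc := by
  induction auth with
  | nil => intro acc _; rfl
  | cons x xs ih =>
      intro acc hpre
      simp only [List.foldl_cons, flatten_to_digits_alt_go]
      rw [ih _ (fun y hy => hpre y (List.mem_cons_of_mem x hy))]
      have : (PySem.Int.toStr x).toList.map
          (fun digit => (PySem.Int.ofChars? [digit]).getD 0) = (bDigitsLoop x []).reverse := by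
        have := item_digits_eq x (hpre x (List.mem_cons_self))
        simpa [pcVal] using this
      rw [this]

-- ===== VERDICT (by name: the statement is the Claim_ definition above) =====
theorem flatten_to_digits_spec : Claim_equal_flatten_to_digits := by
  intro auth _hdom hpre
  unfold Spec_flatten_to_digits flatten_to_digits flatten_to_digits_alt
  exact go_eq auth [] hpre
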